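-- pv_equiv track=rewrite | github.com/farif/SMTSudoku | edu/uiowa/encoder/__init__.py | block_constraints
-- ===== SOURCE A (Python) =====
-- def block_constraints(n):
--
--     sudoku_instance = []
--     for i in range(0, n):
--         for c in range(1, n):
--             a1 = '(assert (Block %s %s))'%(i*n+c,i*n+(c+1))
--             a2 = '(assert(not (Block %s %s)))'%((c-1)*n+1, (c*n)+1)
--             if not a1 in sudoku_instance:
--                 sudoku_instance.append(a1)
--             if not a2 in sudoku_instance:
--                 sudoku_instance.append(a2)
--
--     return '\n'.join(sudoku_instance)
-- ===== SOURCE B (Python) =====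
-- def block_constraints(n):
--     def a1(i, c):
--         return '(assert (Block %s %s))' % (i*n+c, i*n+(c+1))
--
--     def a2(c):
--         return '(assert(not (Block %s %s)))' % ((c-1)*n+1, (c*n)+1)
--
--     out = []
--     # i == 0 block: every a1 is fresh, and each a2 (which depends on c only)
--     # makes its unique appearance here, interleaved with a1.
--     for c in range(1, n):
--         out.append(a1(0, c))
--         out.append(a2(c))
--     # i >= 1 blocks: only the (always fresh) a1 strings are emitted.
--     for i in range(1, n):
--         for c in range(1, n):
--             out.append(a1(i, c))
--     return '\n'.join(out)
-- ===== Notes on version B (the rewrite author's own statement) =====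
-- stated objective: faster
-- what changed: Replaces the single dedup pass with a linear membership test over the growing list by two direct append-only passes (an i=0 pass emitting a1 and a2 interleaved, then a nested pass over i>=1 emitting only a1), exploiting that every a1 string is unique and each a2 depends only on c and first appears at i=0.
import Mathlib
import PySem

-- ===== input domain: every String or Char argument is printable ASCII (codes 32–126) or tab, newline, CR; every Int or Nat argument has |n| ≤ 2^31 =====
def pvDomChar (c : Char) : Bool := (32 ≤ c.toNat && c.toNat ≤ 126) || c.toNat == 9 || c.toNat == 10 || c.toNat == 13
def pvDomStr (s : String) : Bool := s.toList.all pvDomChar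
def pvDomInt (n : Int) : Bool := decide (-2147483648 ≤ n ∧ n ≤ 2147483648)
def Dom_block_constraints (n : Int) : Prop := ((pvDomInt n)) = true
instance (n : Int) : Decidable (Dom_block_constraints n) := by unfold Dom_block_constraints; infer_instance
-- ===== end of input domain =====

-- B replaces A's dedup-by-membership pass with two direct append-only passes (faster; proved equal).

-- ===== PORT A =====
-- shared format helpers: the two '%s'-format strings of the Python source
-- ('%s' formatting of an int is string concatenation with str(n) = PySem.Int.toStr; exact)
def blkA1 (n i c : Int) : String :=
  "(assert (Block " ++ PySem.Int.toStr (i * n + c) ++ " " ++ PySem.Int.toStr (i * n + (c + 1)) ++ "))"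

def blkA2 (n c : Int) : String :=
  "(assert(not (Block " ++ PySem.Int.toStr ((c - 1) * n + 1) ++ " " ++ PySem.Int.toStr (c * n + 1) ++ ")))"

-- loop body of A's inner 'for c' loop: two membership-guarded appends
def blockStep (n i : Int) (acc : List String) (c : Int) : List String :=
  let a1 := blkA1 n i c
  let a2 := blkA2 n c
  let acc2 := if acc.contains a1 then acc else acc ++ [a1]
  if acc2.contains a2 then acc2 else acc2 ++ [a2]

def block_constraints (n : Int) : String :=
  PySem.Str.join "\n"
    ((PySem.List.pyRange 0 n).foldl
      (fun acc i => (PySem.List.pyRange 1 n).foldl (blockStep n i) acc) [])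

-- ===== PORT B =====
def block_constraints_alt (n : Int) : String :=
  -- first pass (i = 0): append a1(0,c) then a2(c) for every c; second pass: only a1(i,c), i ≥ 1
  PySem.Str.join "\n"
    ((PySem.List.pyRange 1 n).foldl
      (fun acc i => (PySem.List.pyRange 1 n).foldl (fun acc c => acc ++ [blkA1 n i c]) acc)
      ((PySem.List.pyRange 1 n).foldl (fun acc c => acc ++ [blkA1 n 0 c] ++ [blkA2 n c]) []))

-- ===== PRECONDITION & SPEC =====
def Spec_block_constraints (n : Int) (out : String) : Prop := out = block_constraints_alt n
instance (n : Int) (out : String) : Decidable (Spec_block_constraints n out) := by unfold Spec_block_constraints; infer_instance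

-- ===== CLAIM (what is proved, stated in full; the proofs are below) =====
def Claim_equal_block_constraints : Prop := ∀ (n : Int), Dom_block_constraints n → Spec_block_constraints n (block_constraints n)

-- ===== LEMMAS AND PROOFS =====

-- decimal digit list of a natural number (the value Nat.toDigits 10 computes)
def pvRep (n : Nat) : List Char :=
  if n < 10 then [Nat.digitChar n] else pvRep (n / 10) ++ [Nat.digitChar (n % 10)]
  decreasing_by exact Nat.div_lt_self (by omega) (by omega)

lemma pvRep_lt {n : Nat} (h : n < 10) : pvRep n = [Nat.digitChar n] := by
  rw [pvRep]; simp [h]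

lemma pvRep_ge {n : Nat} (h : ¬ n < 10) : pvRep n = pvRep (n / 10) ++ [Nat.digitChar (n % 10)] := by
  rw [pvRep]; simp [h]

lemma toDigitsCore_eq_pvRep : ∀ (f n : Nat) (acc : List Char), n < f →
    Nat.toDigitsCore 10 f n acc = pvRep n ++ acc := by
  intro f
  induction f with
  | zero => omega
  | succ f ih =>
    intro n acc h
    rw [Nat.toDigitsCore]
    by_cases h10 : n < 10
    · have hz : n / 10 = 0 := Nat.div_eq_of_lt h10
      rw [pvRep_lt h10]
      simp [hz, Nat.mod_eq_of_lt h10]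
    · have hz : ¬ n / 10 = 0 := by
        intro h0
        exact h10 (Nat.lt_of_div_eq_zero (by norm_num) h0)
      rw [if_neg hz]
      rw [ih (n / 10) _ (by
        have := Nat.div_lt_self (show 0 < n by omega) (show 1 < 10 by omega); omega)]
      rw [pvRep_ge h10]
      simp

lemma toDigits_eq_pvRep (n : Nat) : Nat.toDigits 10 n = pvRep n := by
  rw [Nat.toDigits, toDigitsCore_eq_pvRep (n + 1) n [] (by omega)]
  simp

lemma digitChar_lt_ten_mem (d : Nat) (h : d < 10) :
    Nat.digitChar d ∈ ['0','1','2','3','4','5','6','7','8','9'] := by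
  interval_cases d <;> decide

lemma pvRep_chars (n : Nat) : ∀ ch ∈ pvRep n, ch ∈ ['0','1','2','3','4','5','6','7','8','9'] := by
  induction n using Nat.strong_induction_on with
  | _ n ih =>
    intro ch hch
    by_cases h10 : n < 10
    · rw [pvRep_lt h10] at hch
      simp at hch
      subst hch; exact digitChar_lt_ten_mem n h10
    · rw [pvRep_ge h10] at hch
      simp at hch
      rcases hch with h | h
      · exact ih (n / 10) (Nat.div_lt_self (by omega) (by omega)) ch h
      · subst h; exact digitChar_lt_ten_mem (n % 10) (Nat.mod_lt n (by omega))

lemma pvRep_ne_nil (n : Nat) : pvRep n ≠ [] := by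
  by_cases h10 : n < 10
  · rw [pvRep_lt h10]; simp
  · rw [pvRep_ge h10]; simp

lemma digitChar_inj_lt_ten : ∀ a < 10, ∀ b < 10, Nat.digitChar a = Nat.digitChar b → a = b := by
  decide

lemma pvRep_one_le_length (n : Nat) : 1 ≤ (pvRep n).length := by
  cases h : pvRep n with
  | nil => exact absurd h (pvRep_ne_nil n)
  | cons x xs => simp

lemma pvRep_inj : ∀ (a b : Nat), pvRep a = pvRep b → a = b := by
  intro a
  induction a using Nat.strong_induction_on with
  | _ a ih =>
    intro b h
    by_cases ha : a < 10 <;> by_cases hb : b < 10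
    · rw [pvRep_lt ha, pvRep_lt hb] at h
      simp at h
      exact digitChar_inj_lt_ten a ha b hb h
    · rw [pvRep_lt ha, pvRep_ge hb] at h
      have hl : (1 : Nat) = (pvRep (b / 10)).length + 1 := by
        simpa using congrArg List.length h
      have := pvRep_one_le_length (b / 10)
      omega
    · rw [pvRep_ge ha, pvRep_lt hb] at h
      have hl : (pvRep (a / 10)).length + 1 = (1 : Nat) := by
        simpa using congrArg List.length h
      have := pvRep_one_le_length (a / 10)
      omega
    · rw [pvRep_ge ha, pvRep_ge hb] at h
      obtain ⟨h1, h2⟩ := List.append_inj' h (by simp)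
      have hd : a / 10 = b / 10 := ih (a / 10) (Nat.div_lt_self (by omega) (by omega)) _ h1
      have hm : a % 10 = b % 10 := by
        simp at h2
        exact digitChar_inj_lt_ten _ (Nat.mod_lt a (by omega)) _ (Nat.mod_lt b (by omega)) h2
      omega

lemma neg_not_mem_pvRep (n : Nat) : '-' ∉ pvRep n := by
  intro h
  have := pvRep_chars n '-' h
  simp at this

lemma space_not_mem_pvRep (n : Nat) : ' ' ∉ pvRep n := by
  intro h
  have := pvRep_chars n ' ' h
  simp at this

lemma toChars_eq (x : Int) :
    PySem.Int.toChars x = if x < 0 then '-' :: pvRep x.natAbs else pvRep x.toNat := by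
  rw [PySem.Int.toChars]
  by_cases h : x < 0 <;> simp [h, toDigits_eq_pvRep]

lemma space_not_mem_toChars (x : Int) : ' ' ∉ PySem.Int.toChars x := by
  rw [toChars_eq]
  by_cases h : x < 0 <;> simp [h, space_not_mem_pvRep]

lemma toChars_inj {x y : Int} (h : PySem.Int.toChars x = PySem.Int.toChars y) : x = y := by
  rw [toChars_eq, toChars_eq] at h
  by_cases hx : x < 0 <;> by_cases hy : y < 0 <;> simp [hx, hy] at h
  · have := pvRep_inj _ _ h; omega
  · exact absurd (h ▸ List.mem_cons_self) (neg_not_mem_pvRep y.toNat)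
  · exact absurd (h.symm ▸ List.mem_cons_self) (neg_not_mem_pvRep x.toNat)
  · have := pvRep_inj _ _ h; omega

-- splitting a concatenation at a separator absent from both prefixes
lemma append_sep_inj : ∀ {a b r s : List Char}, ' ' ∉ a → ' ' ∉ b →
    a ++ ' ' :: r = b ++ ' ' :: s → a = b ∧ r = s := by
  intro a
  induction a with
  | nil =>
    intro b r s _ hb h
    cases b with
    | nil => simpa using h
    | cons y ys =>
      simp at h
      obtain ⟨h1, _⟩ := h
      exact absurd (h1 ▸ List.mem_cons_self) hb
  | cons x xs ih =>
    intro b r s ha hb h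
    cases b with
    | nil =>
      simp at h
      obtain ⟨h1, _⟩ := h
      exact absurd (h1 ▸ List.mem_cons_self) ha
    | cons y ys =>
      simp at h
      obtain ⟨h1, h2⟩ := h
      have := ih (by simp at ha; exact ha.2) (by simp at hb; exact hb.2) h2
      exact ⟨by rw [h1, this.1], this.2⟩

lemma blkA1_toList (n i c : Int) :
    (blkA1 n i c).toList = "(assert (Block ".toList ++
      (PySem.Int.toChars (i * n + c) ++ ' ' :: (PySem.Int.toChars (i * n + (c + 1)) ++ "))".toList)) := by
  simp [blkA1, String.toList_append, PySem.Int.toList_toStr]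

lemma blkA2_toList (n c : Int) :
    (blkA2 n c).toList = "(assert(not (Block ".toList ++
      (PySem.Int.toChars ((c - 1) * n + 1) ++ ' ' :: (PySem.Int.toChars (c * n + 1) ++ ")))".toList)) := by
  simp [blkA2, String.toList_append, PySem.Int.toList_toStr]

-- F1: the first formatted number determines equality of a1 strings
lemma blkA1_inj {n i c i' c' : Int} (h : blkA1 n i c = blkA1 n i' c') :
    i * n + c = i' * n + c' := by
  have h' := congrArg String.toList h
  rw [blkA1_toList, blkA1_toList] at h'
  have h2 := List.append_cancel_left h'
  exact toChars_inj (append_sep_inj (space_not_mem_toChars _) (space_not_mem_toChars _) h2).1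

-- F3: equality of a2 strings determines c (n ≠ 0)
lemma blkA2_inj {n c c' : Int} (hn : n ≠ 0) (h : blkA2 n c = blkA2 n c') : c = c' := by
  have h' := congrArg String.toList h
  rw [blkA2_toList, blkA2_toList] at h'
  have h2 := List.append_cancel_left h'
  have h3 := toChars_inj (append_sep_inj (space_not_mem_toChars _) (space_not_mem_toChars _) h2).1
  have : (c - 1) * n = (c' - 1) * n := by omega
  have := mul_right_cancel₀ hn this
  omega

-- F2: an a1 string is never an a2 string (they differ at character 7)
lemma blkA1_ne_blkA2 (n i c n' c' : Int) : blkA1 n i c ≠ blkA2 n' c' := by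
  intro h
  have h' : (blkA1 n i c).toList[7]? = (blkA2 n' c').toList[7]? := congrArg (fun s => s.toList[7]?) h
  rw [blkA1_toList, blkA2_toList] at h'
  rw [List.getElem?_append_left (by decide), List.getElem?_append_left (by decide)] at h'
  simp at h'

-- bounded distinct block indices give distinct a1 numbers
lemma key_arith {n i j c c' : Int} (hn : 2 ≤ n) (hc : 1 ≤ c) (hc2 : c < n)
    (hc' : 1 ≤ c') (hc2' : c' < n) (hij : i ≠ j) : i * n + c ≠ j * n + c' := by
  intro h
  rcases lt_or_gt_of_ne hij with h1 | h1
  · have h2 : (i + 1) * n ≤ j * n := mul_le_mul_of_nonneg_right (by omega) (by omega)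
    nlinarith
  · have h2 : (j + 1) * n ≤ i * n := mul_le_mul_of_nonneg_right (by omega) (by omega)
    nlinarith

-- one blockStep when a1 is fresh and a2 is fresh: both get appended
lemma blockStep_both {n i c : Int} {acc : List String}
    (h1 : blkA1 n i c ∉ acc) (h2 : blkA2 n c ∉ acc) :
    blockStep n i acc c = acc ++ [blkA1 n i c] ++ [blkA2 n c] := by
  have hx : blkA2 n c ∉ acc ++ [blkA1 n i c] := by
    intro hm
    rcases List.mem_append.mp hm with hm | hm
    · exact h2 hm
    · simp at hm
      exact blkA1_ne_blkA2 n i c n c hm.symm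
  simp only [blockStep, List.contains_iff_mem]
  rw [if_neg h1, if_neg hx]

-- one blockStep when a1 is fresh and a2 already present: only a1 appended
lemma blockStep_one {n i c : Int} {acc : List String}
    (h1 : blkA1 n i c ∉ acc) (h2 : blkA2 n c ∈ acc) :
    blockStep n i acc c = acc ++ [blkA1 n i c] := by
  simp only [blockStep, List.contains_iff_mem]
  rw [if_neg h1, if_pos (List.mem_append_left _ h2)]

-- the i = 0 row from a fresh accumulator appends a1 and a2 interleaved
lemma foldl_rowZero (n : Int) (hn : n ≠ 0) :
    ∀ (cs : List Int) (acc : List String), cs.Nodup →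
    (∀ c ∈ cs, blkA1 n 0 c ∉ acc ∧ blkA2 n c ∉ acc) →
    cs.foldl (blockStep n 0) acc = acc ++ cs.flatMap (fun c => [blkA1 n 0 c, blkA2 n c]) := by
  intro cs
  induction cs with
  | nil => intro acc _ _; simp
  | cons c rest ih =>
    intro acc hnd hf
    obtain ⟨h1, h2⟩ := hf c (by simp)
    rw [List.foldl_cons, blockStep_both h1 h2]
    rw [ih _ (List.Nodup.of_cons hnd) ?_]
    · simp
    · intro c' hc'
      obtain ⟨g1, g2⟩ := hf c' (by simp [hc'])
      have hne : c' ≠ c := by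
        rintro rfl; exact (List.nodup_cons.mp hnd).1 hc'
      constructor
      · simp only [List.mem_append, List.mem_singleton]
        rintro ((h | h) | h)
        · exact g1 h
        · exact hne (by have := blkA1_inj h; omega)
        · exact blkA1_ne_blkA2 n 0 c' n c h
      · simp only [List.mem_append, List.mem_singleton]
        rintro ((h | h) | h)
        · exact g2 h
        · exact blkA1_ne_blkA2 n 0 c n c' h.symm
        · exact hne (blkA2_inj hn h)

-- a later row (a2 already present for every c) appends only the a1 strings
lemma foldl_row (n i : Int) :
    ∀ (cs : List Int) (acc : List String), cs.Nodup →
    (∀ c ∈ cs, blkA1 n i c ∉ acc ∧ blkA2 n c ∈ acc) →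
    cs.foldl (blockStep n i) acc = acc ++ cs.map (blkA1 n i) := by
  intro cs
  induction cs with
  | nil => intro acc _ _; simp
  | cons c rest ih =>
    intro acc hnd hf
    obtain ⟨h1, h2⟩ := hf c (by simp)
    rw [List.foldl_cons, blockStep_one h1 h2]
    rw [ih _ (List.Nodup.of_cons hnd) ?_]
    · simp
    · intro c' hc'
      obtain ⟨g1, g2⟩ := hf c' (by simp [hc'])
      have hne : c' ≠ c := by
        rintro rfl; exact (List.nodup_cons.mp hnd).1 hc'
      constructor
      · simp only [List.mem_append, List.mem_singleton]
        rintro (h | h)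
        · exact g1 h
        · exact hne (by have := blkA1_inj h; omega)
      · exact List.mem_append_left _ g2

-- the rows i ≥ 1 of A compute exactly B's append-only rows
lemma foldl_rows (n : Int) (hn : 2 ≤ n) :
    ∀ (is : List Int) (acc : List String), is.Nodup →
    (∀ j ∈ is, 1 ≤ j ∧ j < n) →
    (∀ j c, j ∈ is → 1 ≤ c → c < n → blkA1 n j c ∉ acc) →
    (∀ c, 1 ≤ c → c < n → blkA2 n c ∈ acc) →
    is.foldl (fun acc i => (PySem.List.pyRange 1 n).foldl (blockStep n i) acc) acc
      = is.foldl (fun acc i => (PySem.List.pyRange 1 n).foldl (fun acc c => acc ++ [blkA1 n i c]) acc) acc := by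
  intro is
  induction is with
  | nil => intro acc _ _ _ _; simp
  | cons i rest ih =>
    intro acc hnd hb h1 h2
    rw [List.foldl_cons, List.foldl_cons]
    have hrow : (PySem.List.pyRange 1 n).foldl (blockStep n i) acc
        = acc ++ (PySem.List.pyRange 1 n).map (blkA1 n i) := by
      apply foldl_row n i _ _ (PySem.List.nodup_pyRange_one 1 n)
      intro c hc
      obtain ⟨hc1, hc2⟩ := PySem.List.mem_pyRange_one.mp hc
      exact ⟨h1 i c (by simp) hc1 hc2, h2 c hc1 hc2⟩
    rw [hrow, PySem.List.foldl_append_singleton_eq_map]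
    apply ih _ (List.Nodup.of_cons hnd) (fun j hj => hb j (by simp [hj]))
    · intro j c hj hc1 hc2
      simp only [List.mem_append]
      rintro (h | h)
      · exact h1 j c (by simp [hj]) hc1 hc2 h
      · simp at h
        obtain ⟨c', hc', he⟩ := h
        obtain ⟨hd1, hd2⟩ := hc'
        have hij : j ≠ i := by
          rintro rfl; exact (List.nodup_cons.mp hnd).1 hj
        exact key_arith hn hc1 hc2 hd1 hd2 hij (blkA1_inj he.symm)
    · intro c hc1 hc2
      exact List.mem_append_left _ (h2 c hc1 hc2)

-- ===== VERDICT (by name: the statement is the Claim_ definition above) =====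
theorem block_constraints_spec : Claim_equal_block_constraints := by
  intro n _
  unfold Spec_block_constraints block_constraints block_constraints_alt
  by_cases hn : n < 2
  · -- inner ranges are empty: both lists are empty
    have hnil : PySem.List.pyRange 1 n = [] := PySem.List.pyRange_one_eq_nil (by omega)
    rw [hnil]
    simp [List.foldl_fixed]
  · rw [not_lt] at hn
    have hn0 : n ≠ 0 := by omega
    have hsplit : PySem.List.pyRange 0 n = 0 :: PySem.List.pyRange 1 n := by
      have := PySem.List.pyRange_one_cons (a := 0) (b := n) (by omega)
      simpa using this
    rw [hsplit, List.foldl_cons]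
    -- B's first pass builds the flatMap block
    have hB0 : (PySem.List.pyRange 1 n).foldl
        (fun acc c => acc ++ [blkA1 n 0 c] ++ [blkA2 n c]) ([] : List String)
        = (PySem.List.pyRange 1 n).flatMap (fun c => [blkA1 n 0 c, blkA2 n c]) := by
      rw [PySem.List.foldl_congr_mem _ _
        (fun acc c => acc ++ [blkA1 n 0 c, blkA2 n c]) _ (by intro acc x _; simp)]
      rw [PySem.List.foldl_append_eq_flatMap]
      simp
    -- A's i = 0 row builds the same block
    have hA0 : (PySem.List.pyRange 1 n).foldl (blockStep n 0) ([] : List String)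
        = (PySem.List.pyRange 1 n).flatMap (fun c => [blkA1 n 0 c, blkA2 n c]) := by
      rw [foldl_rowZero n hn0 _ _ (PySem.List.nodup_pyRange_one 1 n) (by intro c _; simp)]
      simp
    rw [hA0, hB0]
    -- remaining rows agree by foldl_rows
    congr 1
    apply foldl_rows n hn _ _ (PySem.List.nodup_pyRange_one 1 n)
    · intro j hj; exact PySem.List.mem_pyRange_one.mp hj
    · intro j c hj hc1 hc2 hmem
      obtain ⟨hj1, hj2⟩ := PySem.List.mem_pyRange_one.mp hj
      simp only [List.mem_flatMap] at hmem
      obtain ⟨c', hc', hm⟩ := hmem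
      obtain ⟨hd1, hd2⟩ := PySem.List.mem_pyRange_one.mp hc'
      simp at hm
      rcases hm with h | h
      · exact key_arith hn hc1 hc2 hd1 hd2 (show j ≠ (0:Int) by omega) (blkA1_inj h)
      · exact blkA1_ne_blkA2 n j c n c' h
    · intro c hc1 hc2
      simp only [List.mem_flatMap]
      exact ⟨c, PySem.List.mem_pyRange_one.mpr ⟨hc1, hc2⟩, by simp⟩
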